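-- pv_equiv track=rewrite | github.com/pypi-data/pypi-mirror-365 | packages/personnel_matching_data_process_algo_v2/personnel_matching_data_process_algo_v2-0.0.1b8.tar.gz/personnel_matching_data_process_algo_v2-0.0.1b8/src/auto_teacher_process/utils/name_utils.py | merge_adjacent_words
-- ===== SOURCE A (Python) =====
-- def merge_adjacent_words(variant):
--     new_variants = []
--     words = variant.split(" ")  # 将字符串按空格分隔为单词列表
--     n = len(words)
--     if n < 2:
--         return words
--
--     # 遍历每种拼接长度（从 2 到 n 个单词拼接）
--     for merge_length in range(2, n + 1):  # 修正为 n+1，包含 n 个单词拼接的情况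
--         # 遍历所有可能的拼接起始位置
--         for i in range(n - merge_length + 1):
--             # 拼接从第 i 个开始的 merge_length 个单词
--             merged_words = words[:i] + ["".join(words[i : i + merge_length])] + words[i + merge_length :]
--             new_variants.append(" ".join(merged_words))  # 拼接为字符串
--
--     # 加入原始形式
--     new_variants.append(variant)
--
--     return sorted(set(new_variants))  # 去重并排序
-- ===== SOURCE B (Python) =====
-- def merge_adjacent_words(variant):
--     words = variant.split(" ")
--     if len(words) < 2:
--         return words
--     spaces = [i for i, c in enumerate(variant) if c == " "]
--     out = [variant]
--     for a in range(len(spaces)):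
--         for b in range(a, len(spaces)):
--             out.append(variant[:spaces[a]]
--                        + variant[spaces[a]:spaces[b] + 1].replace(" ", "")
--                        + variant[spaces[b] + 1:])
--     return sorted(set(out))
-- ===== Notes on version B (the rewrite author's own statement) =====
-- stated objective: alternative
-- what changed: B precomputes the table of space-character indices of the original string once and builds each merged variant by direct string slicing (prefix + de-spaced middle slice + suffix) over pairs of space positions, instead of A's per-(length,start) rebuild of the word list and double join.
import Mathlib
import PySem

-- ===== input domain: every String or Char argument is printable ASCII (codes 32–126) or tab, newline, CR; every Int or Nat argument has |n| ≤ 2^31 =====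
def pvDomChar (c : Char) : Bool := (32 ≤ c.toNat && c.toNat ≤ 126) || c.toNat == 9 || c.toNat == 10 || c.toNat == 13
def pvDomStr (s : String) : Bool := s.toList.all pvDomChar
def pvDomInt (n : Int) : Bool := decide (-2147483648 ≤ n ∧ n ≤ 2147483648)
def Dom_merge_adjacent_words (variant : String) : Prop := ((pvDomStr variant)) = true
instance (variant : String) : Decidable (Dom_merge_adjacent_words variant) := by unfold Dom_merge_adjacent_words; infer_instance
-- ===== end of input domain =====

-- B replaces A's per-pair word-list rebuild + join by precomputed space positions and
-- string slicing on the original string (objective: alternative decomposition, same cost class).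

-- ===== PORT A =====
def merge_adjacent_words (variant : String) : List String :=
  let new_variants : List String := []
  let words := (PySem.Str.split? variant " ").getD []
  let n : Int := PySem.List.len words
  if n < 2 then words
  else
    let new_variants := (PySem.List.pyRange 2 (n + 1)).foldl (fun acc merge_length =>
      (PySem.List.pyRange 0 (n - merge_length + 1)).foldl (fun acc i =>
        let merged_words := PySem.List.slice words none (some i) ++
          [PySem.Str.join "" (PySem.List.slice words (some i) (some (i + merge_length)))] ++
          PySem.List.slice words (some (i + merge_length)) none
        acc ++ [PySem.Str.join " " merged_words]) acc) new_variants
    let new_variants := new_variants ++ [variant]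
    PySem.List.sorted (PySem.Set.ofList new_variants) (fun x => x)

-- ===== PORT B =====
def merge_adjacent_words_alt (variant : String) : List String :=
  let words := (PySem.Str.split? variant " ").getD []
  if PySem.List.len words < 2 then words
  else
    let spaces := ((PySem.List.enumerate variant.toList).filter (fun p => p.2 == ' ')).map (·.1)
    let out := [variant]
    let out := (PySem.List.pyRange 0 (PySem.List.len spaces)).foldl (fun acc a =>
      (PySem.List.pyRange a (PySem.List.len spaces)).foldl (fun acc b =>
        let sa := PySem.List.pyGetD spaces a 0
        let sb := PySem.List.pyGetD spaces b 0
        acc ++ [PySem.Str.slice variant none (some sa) ++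
                PySem.Str.replace (PySem.Str.slice variant (some sa) (some (sb + 1))) " " "" ++
                PySem.Str.slice variant (some (sb + 1)) none]) acc) out
    PySem.List.sorted (PySem.Set.ofList out) (fun x => x)

-- ===== PRECONDITION & SPEC =====
def Spec_merge_adjacent_words (variant : String) (out : List String) : Prop := out = merge_adjacent_words_alt variant
instance (variant : String) (out : List String) : Decidable (Spec_merge_adjacent_words variant out) := by unfold Spec_merge_adjacent_words; infer_instance

-- ===== CLAIM (what is proved, stated in full; the proofs are below) =====
def Claim_equal_merge_adjacent_words : Prop := ∀ (variant : String), Dom_merge_adjacent_words variant → Spec_merge_adjacent_words variant (merge_adjacent_words variant)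

-- ===== LEMMAS AND PROOFS =====

theorem pv_isPrefixOf_space (c : Char) (l : List Char) :
    List.isPrefixOf [' '] (c :: l) = (c == ' ') := by
  simp [List.isPrefixOf, eq_comm]

theorem pv_splitOn_cons (c : Char) (xs : List Char) :
    List.splitOn ' ' (c :: xs) =
      if c == ' ' then [] :: List.splitOn ' ' xs
      else (List.splitOn ' ' xs).modifyHead (c :: ·) := by
  simp [List.splitOn, List.splitOnP_cons]

theorem pv_splitOn_ne_nil (xs : List Char) : List.splitOn ' ' xs ≠ [] :=
  List.splitOnP_ne_nil _ xs

theorem pv_go_eq (cs : List Char) : ∀ (fuel : Nat) (cur : List Char) (acc : List (List Char)),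
    cs.length + 1 ≤ fuel →
    PySem.Chars.splitOn.go [' '] fuel cs cur acc
      = acc.reverse ++ (List.splitOn ' ' cs).modifyHead (cur.reverse ++ ·) := by
  induction cs with
  | nil =>
    intro fuel cur acc h
    match fuel, h with
    | fuel + 1, _ => simp [PySem.Chars.splitOn.go, List.splitOn_nil]
  | cons c rest ih =>
    intro fuel cur acc h
    match fuel, h with
    | fuel + 1, h =>
      simp only [PySem.Chars.splitOn.go, pv_isPrefixOf_space]
      by_cases hc : c = ' '
      · subst hc
        rw [if_pos (by simp)]
        have : List.drop ([' '].length) (' ' :: rest) = rest := by simp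
        rw [this, ih fuel [] (cur.reverse :: acc) (by simpa using h)]
        rw [pv_splitOn_cons]
        rcases List.splitOn ' ' rest with _ | ⟨hd, tl⟩ <;> simp
      · rw [if_neg (by simp [hc]), ih fuel (c :: cur) acc (by simpa using h)]
        rw [pv_splitOn_cons]
        rcases hsp : List.splitOn ' ' rest with _ | ⟨hd, tl⟩
        · exact absurd hsp (pv_splitOn_ne_nil rest)
        · simp [hc]

theorem pv_splitOn_eq (cs : List Char) :
    PySem.Chars.splitOn cs [' '] = List.splitOn ' ' cs := by
  rw [PySem.Chars.splitOn, pv_go_eq cs (cs.length + 1) [] [] le_rfl]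
  rcases h : List.splitOn ' ' cs with _ | ⟨hd, tl⟩
  · exact absurd h (pv_splitOn_ne_nil cs)
  · simp

theorem pv_splitOn_no_space (cs : List Char) : ∀ w ∈ List.splitOn ' ' cs, ' ' ∉ w := by
  induction cs with
  | nil => simp [List.splitOn_nil]
  | cons c rest ih =>
    rw [pv_splitOn_cons]
    by_cases hc : c = ' '
    · simp only [hc, beq_self_eq_true, if_pos]
      intro w hw
      rw [List.mem_cons] at hw
      rcases hw with hw | hw
      · simp [hw]
      · exact ih w hw
    · rw [if_neg (by simp [hc])]
      rcases hsp : List.splitOn ' ' rest with _ | ⟨hd, tl⟩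
      · exact absurd hsp (pv_splitOn_ne_nil rest)
      · intro w hw
        simp only [List.modifyHead_cons, List.mem_cons] at hw
        rcases hw with hw | hw
        · subst hw
          intro hmem
          rw [List.mem_cons] at hmem
          rcases hmem with hm | hm
          · exact hc hm.symm
          · exact ih hd (by rw [hsp]; exact .head _) hm
        · exact ih w (by rw [hsp]; exact .tail _ hw)

theorem pv_intercalate_cons (s : Char) (w : List Char) (v : List (List Char)) (hv : v ≠ []) :
    [s].intercalate (w :: v) = w ++ s :: [s].intercalate v := by
  rcases v with _ | ⟨v0, vs⟩
  · exact absurd rfl hv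
  · simp [List.intercalate, List.intersperse]

theorem pv_intercalate_singleton (s : Char) (w : List Char) :
    [s].intercalate [w] = w := by
  simp [List.intercalate]

theorem pv_intercalate_append (s : Char) (u v : List (List Char)) (hu : u ≠ []) (hv : v ≠ []) :
    [s].intercalate (u ++ v) = [s].intercalate u ++ s :: [s].intercalate v := by
  induction u with
  | nil => exact absurd rfl hu
  | cons w us ih =>
    rcases us with _ | ⟨u1, us'⟩
    · rw [List.singleton_append, pv_intercalate_cons s w v hv, pv_intercalate_singleton]
    · rw [List.cons_append, pv_intercalate_cons s w _ (by simp),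
          pv_intercalate_cons s w _ (by simp), ih (by simp)]
      simp

def pvSpacePos : List (List Char) → List Nat
  | [] => []
  | [_] => []
  | w :: ws@(_ :: _) => w.length :: (pvSpacePos ws).map (· + (w.length + 1))

theorem pv_length_spacePos (ws : List (List Char)) :
    (pvSpacePos ws).length = ws.length - 1 := by
  induction ws with
  | nil => simp [pvSpacePos]
  | cons w ws ih =>
    rcases ws with _ | ⟨w1, ws'⟩
    · simp [pvSpacePos]
    · simp [pvSpacePos] at ih ⊢
      omega

theorem pv_spacePos_pairwise (ws : List (List Char)) :
    (pvSpacePos ws).Pairwise (· < ·) := by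
  induction ws with
  | nil => simp [pvSpacePos]
  | cons w ws ih =>
    rcases ws with _ | ⟨w1, ws'⟩
    · simp [pvSpacePos]
    · rw [pvSpacePos]
      refine List.Pairwise.cons ?_ ?_
      · intro x hx
        simp only [List.mem_map] at hx
        obtain ⟨y, _, rfl⟩ := hx
        omega
      · exact (List.pairwise_map).2 (ih.imp (by omega))

theorem pv_take_spacePos (ws : List (List Char)) : ∀ (k : Nat) (hk : k < (pvSpacePos ws).length),
    ([' '].intercalate ws).take ((pvSpacePos ws)[k]) = [' '].intercalate (ws.take (k+1)) := by
  induction ws with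
  | nil => simp [pvSpacePos]
  | cons w ws ih =>
    rcases ws with _ | ⟨w1, ws'⟩
    · simp [pvSpacePos]
    · intro k hk
      have hins : [' '].intercalate (w :: w1 :: ws') = w ++ ' ' :: [' '].intercalate (w1 :: ws') :=
        pv_intercalate_cons ' ' w _ (by simp)
      rcases k with _ | k
      · simp only [pvSpacePos, List.getElem_cons_zero, hins]
        rw [List.take_append]
        simp [pv_intercalate_singleton]
      · simp only [pvSpacePos, List.length_cons] at hk
        have hk' : k < (pvSpacePos (w1 :: ws')).length := by
          rw [List.length_map] at hk; omega
        simp only [pvSpacePos, List.getElem_cons_succ, List.getElem_map, hins]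
        rw [List.take_append]
        have h1 : List.take ((pvSpacePos (w1 :: ws'))[k] + (w.length + 1)) w = w :=
          List.take_of_length_le (by omega)
        have h2 : (pvSpacePos (w1 :: ws'))[k] + (w.length + 1) - w.length = (pvSpacePos (w1 :: ws'))[k] + 1 := by omega
        rw [h1, h2, List.take_cons (by omega)]
        simp only [Nat.add_sub_cancel]
        rw [ih k hk']
        rw [show List.take (k+1+1) (w::w1::ws') = w :: (w1 :: List.take k ws') from by
              simp [List.take_succ_cons]]
        rw [pv_intercalate_cons ' ' w (w1 :: List.take k ws') (by simp)]
        simp [List.take_succ_cons]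

theorem pv_drop_spacePos (ws : List (List Char)) : ∀ (k : Nat) (hk : k < (pvSpacePos ws).length),
    ([' '].intercalate ws).drop ((pvSpacePos ws)[k] + 1) = [' '].intercalate (ws.drop (k+1)) := by
  induction ws with
  | nil => simp [pvSpacePos]
  | cons w ws ih =>
    rcases ws with _ | ⟨w1, ws'⟩
    · simp [pvSpacePos]
    · intro k hk
      have hins : [' '].intercalate (w :: w1 :: ws') = w ++ ' ' :: [' '].intercalate (w1 :: ws') :=
        pv_intercalate_cons ' ' w _ (by simp)
      rcases k with _ | k
      · simp only [pvSpacePos, List.getElem_cons_zero, hins]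
        rw [List.drop_append]
        simp
      · simp only [pvSpacePos, List.length_cons] at hk
        have hk' : k < (pvSpacePos (w1 :: ws')).length := by
          rw [List.length_map] at hk; omega
        simp only [pvSpacePos, List.getElem_cons_succ, List.getElem_map, hins]
        rw [List.drop_append]
        have h1 : List.drop ((pvSpacePos (w1 :: ws'))[k] + (w.length + 1) + 1) w = [] :=
          List.drop_eq_nil_of_le (by omega)
        have h2 : (pvSpacePos (w1 :: ws'))[k] + (w.length + 1) + 1 - w.length = (pvSpacePos (w1 :: ws'))[k] + 1 + 1 := by omega
        rw [h1, h2, List.drop_succ_cons, ih k hk']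
        simp

-- enumerate of an append
theorem pv_enumerate_append (xs ys : List Char) (s : Int) :
    PySem.List.enumerate (xs ++ ys) s
      = PySem.List.enumerate xs s ++ PySem.List.enumerate ys (s + xs.length) := by
  induction xs generalizing s with
  | nil => simp [PySem.List.enumerate]
  | cons a t ih =>
    simp only [List.cons_append, PySem.List.enumerate, ih, List.length_cons]
    push_cast
    ring_nf

theorem pv_enumerate_nospace (w : List Char) (s : Int) (h : ' ' ∉ w) :
    (PySem.List.enumerate w s).filter (fun p => p.2 == ' ') = [] := by
  induction w generalizing s with
  | nil => simp [PySem.List.enumerate]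
  | cons c t ih =>
    simp only [PySem.List.enumerate, List.filter_cons]
    rw [if_neg (by simp; intro hc; exact h (hc ▸ List.mem_cons_self ..))]
    exact ih (s+1) (fun hm => h (List.mem_cons_of_mem _ hm))

-- replace(" ", "") is filter
theorem pv_replace_go (l : List Char) : ∀ (fuel : Nat) (acc : List Char), l.length ≤ fuel →
    PySem.Chars.replace.go [' '] [] fuel l acc = acc.reverse ++ l.filter (fun c => c != ' ') := by
  induction l with
  | nil =>
    intro fuel acc h
    cases fuel <;> simp [PySem.Chars.replace.go]
  | cons c t ih =>
    intro fuel acc h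
    match fuel, h with
    | fuel + 1, h =>
      simp only [PySem.Chars.replace.go]
      by_cases hc : c = ' '
      · subst hc
        rw [if_pos (by rw [pv_isPrefixOf_space]; simp)]
        simp only [List.reverse_nil, List.nil_append]
        rw [show List.drop [' '].length (' ' :: t) = t from by simp]
        rw [ih fuel acc (by simpa using h)]
        simp
      · rw [if_neg (by rw [pv_isPrefixOf_space]; simp [hc])]
        rw [ih fuel (c :: acc) (by simpa using h)]
        simp [hc]

theorem pv_replace_space (l : List Char) :
    PySem.Chars.replace l [' '] [] = l.filter (fun c => c != ' ') := by
  rw [PySem.Chars.replace]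
  rw [if_neg (by simp)]
  simpa using pv_replace_go l l.length [] le_rfl

theorem pv_filter_intercalate (ws : List (List Char)) (h : ∀ w ∈ ws, ' ' ∉ w) :
    ([' '].intercalate ws).filter (fun c => c != ' ') = ws.flatten := by
  induction ws with
  | nil => simp [List.intercalate]
  | cons w ws ih =>
    rcases ws with _ | ⟨w1, ws'⟩
    · rw [pv_intercalate_singleton]
      simp only [List.flatten_cons, List.flatten_nil, List.append_nil]
      exact List.filter_eq_self.2 (fun c hc => by
        simp only [bne_iff_ne, ne_eq]
        intro hcs; exact h w (.head _) (hcs ▸ hc))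
    · rw [pv_intercalate_cons ' ' w _ (by simp)]
      rw [List.filter_append, List.filter_cons]
      rw [if_neg (by simp)]
      rw [ih (fun x hx => h x (.tail _ hx))]
      rw [List.filter_eq_self.2 (fun c hc => by
        simp only [bne_iff_ne, ne_eq]
        intro hcs; exact h w (.head _) (hcs ▸ hc))]
      simp

theorem pv_spaces_eq (ws : List (List Char)) :
    ∀ (s : Int), (∀ w ∈ ws, ' ' ∉ w) → ws ≠ [] →
    ((PySem.List.enumerate ([' '].intercalate ws) s).filter (fun p => p.2 == ' ')).map (·.1)
      = (pvSpacePos ws).map (fun k : Nat => s + (k : Int)) := by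
  induction ws with
  | nil => intro s _ hne; exact absurd rfl hne
  | cons w ws ih =>
    intro s h _
    rcases ws with _ | ⟨w1, ws'⟩
    · rw [pv_intercalate_singleton, pv_enumerate_nospace w s (h w (.head _))]
      simp [pvSpacePos]
    · rw [pv_intercalate_cons ' ' w _ (by simp)]
      rw [pv_enumerate_append, List.filter_append]
      rw [pv_enumerate_nospace w s (h w (.head _))]
      simp only [PySem.List.enumerate, List.filter_cons, List.nil_append]
      rw [if_pos (by simp)]
      simp only [List.map_cons]
      rw [ih (s + ↑w.length + 1) (fun x hx => h x (.tail _ hx)) (by simp)]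
      simp only [pvSpacePos, List.map_cons, List.map_map]
      congr 1
      apply List.map_congr_left
      intro k _
      simp only [Function.comp_apply]
      push_cast
      ring

theorem pv_spacePos_mono (ws : List (List Char)) {a b : Nat} (hab : a ≤ b)
    (hb : b < (pvSpacePos ws).length) :
    (pvSpacePos ws)[a]'(by omega) ≤ (pvSpacePos ws)[b] := by
  rcases Nat.lt_or_ge a b with hlt | hge
  · exact le_of_lt ((List.pairwise_iff_getElem.mp (pv_spacePos_pairwise ws)) a b (by omega) hb hlt)
  · have : a = b := by omega
    subst this; rfl

theorem pv_drop_at_space (ws : List (List Char)) (k : Nat) (hk : k < (pvSpacePos ws).length) :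
    ([' '].intercalate ws).drop ((pvSpacePos ws)[k])
      = ' ' :: [' '].intercalate (ws.drop (k+1)) := by
  have hn : (pvSpacePos ws).length = ws.length - 1 := pv_length_spacePos ws
  have hk1 : k + 1 < ws.length := by omega
  have hsplit : [' '].intercalate ws
      = [' '].intercalate (ws.take (k+1)) ++ ' ' :: [' '].intercalate (ws.drop (k+1)) := by
    conv_lhs => rw [← List.take_append_drop (k+1) ws]
    exact pv_intercalate_append ' ' _ _
      (by rcases ws with _ | ⟨w0, t⟩
          · simp at hk1
          · simp)
      (by simp [List.drop_eq_nil_iff]; omega)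
  have htake := pv_take_spacePos ws k hk
  have hEq : ([' '].intercalate ws).take ((pvSpacePos ws)[k]) ++ ([' '].intercalate ws).drop ((pvSpacePos ws)[k])
      = ([' '].intercalate ws).take ((pvSpacePos ws)[k]) ++ (' ' :: [' '].intercalate (ws.drop (k+1))) := by
    rw [List.take_append_drop, htake, ← hsplit]
  exact List.append_cancel_left hEq

theorem pv_pointwise (ws : List (List Char)) (h : ∀ w ∈ ws, ' ' ∉ w) (a b : Nat)
    (hab : a ≤ b) (hb : b < (pvSpacePos ws).length) :
    ([' '].intercalate ws).take ((pvSpacePos ws)[a]'(by omega)) ++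
      ((([' '].intercalate ws).drop ((pvSpacePos ws)[a]'(by omega))).take
          ((pvSpacePos ws)[b] + 1 - (pvSpacePos ws)[a]'(by omega))).filter (fun c => c != ' ') ++
      ([' '].intercalate ws).drop ((pvSpacePos ws)[b] + 1)
    = [' '].intercalate (ws.take a ++ ((ws.drop a).take (b - a + 2)).flatten :: ws.drop (a + (b - a + 2))) := by
  have hn : (pvSpacePos ws).length = ws.length - 1 := pv_length_spacePos ws
  have hbn : b + 1 < ws.length := by omega
  have han : a < ws.length := by omega
  set cs := [' '].intercalate ws with hcs
  set sp := pvSpacePos ws with hsp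
  have hsa : a < sp.length := by omega
  have hmono : sp[a]'hsa ≤ sp[b] := pv_spacePos_mono ws hab hb
  -- the three pieces
  have htake : cs.take (sp[a]'hsa) = [' '].intercalate (ws.take (a+1)) := pv_take_spacePos ws a hsa
  have hdropb : cs.drop (sp[b] + 1) = [' '].intercalate (ws.drop (b+1)) := pv_drop_spacePos ws b hb
  have hdropa : cs.drop (sp[a]'hsa) = ' ' :: [' '].intercalate (ws.drop (a+1)) := pv_drop_at_space ws a hsa
  -- middle filter
  set X := (cs.drop (sp[a]'hsa)).take (sp[b] + 1 - sp[a]'hsa) with hX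
  have hXsplit : X ++ cs.drop (sp[b] + 1) = cs.drop (sp[a]'hsa) := by
    rw [hX]
    have : (cs.drop (sp[a]'hsa)).drop (sp[b] + 1 - sp[a]'hsa) = cs.drop (sp[b] + 1) := by
      rw [List.drop_drop]
      congr 1
      omega
    rw [← this]
    exact List.take_append_drop _ _
  have hfa : (cs.drop (sp[a]'hsa)).filter (fun c => c != ' ') = (ws.drop (a+1)).flatten := by
    rw [hdropa, List.filter_cons, if_neg (by simp)]
    exact pv_filter_intercalate _ (fun w hw => h w (List.mem_of_mem_drop hw))
  have hfb : (cs.drop (sp[b] + 1)).filter (fun c => c != ' ') = (ws.drop (b+1)).flatten := by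
    rw [hdropb]
    exact pv_filter_intercalate _ (fun w hw => h w (List.mem_of_mem_drop hw))
  have hflat : (ws.drop (a+1)).flatten
      = ((ws.drop (a+1)).take (b-a)).flatten ++ (ws.drop (b+1)).flatten := by
    conv_lhs => rw [← List.take_append_drop (b-a) (ws.drop (a+1))]
    rw [List.flatten_append, List.drop_drop, show a + 1 + (b - a) = b + 1 from by omega]
  have hXf : X.filter (fun c => c != ' ') = ((ws.drop (a+1)).take (b-a)).flatten := by
    have := congrArg (List.filter (fun c => c != ' ')) hXsplit
    rw [List.filter_append, hfa, hfb, hflat] at this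
    exact List.append_cancel_right this
  rw [htake, hXf, hdropb]
  -- decompose the canonical form
  have hX0 : ((ws.drop a).take (b - a + 2)).flatten
      = ws[a] ++ (((ws.drop (a+1)).take (b-a)).flatten ++ ws[b+1]) := by
    rw [List.drop_eq_getElem_cons han]
    rw [show b - a + 2 = (b - a + 1) + 1 from rfl, List.take_succ_cons]
    have : (ws.drop (a+1)).take (b - a + 1)
        = (ws.drop (a+1)).take (b - a) ++ [ws[b+1]] := by
      have hlt : b - a < (ws.drop (a+1)).length := by simp; omega
      rw [List.take_succ_eq_append_getElem hlt]
      congr 2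
      rw [List.getElem_drop]
      congr 1
      omega
    rw [this]
    simp
  have hdb1 : ws.drop (b+1) = ws[b+1] :: ws.drop (b+2) := List.drop_eq_getElem_cons hbn
  have hsundry : a + (b - a + 2) = b + 2 := by omega
  rw [hsundry, hX0, hdb1]
  -- case split on a = 0 and drop (b+2) = []
  rcases Nat.eq_zero_or_pos a with ha0 | hapos
  · subst ha0
    simp only [List.take_zero, List.nil_append]
    rw [show (0:Nat) + 1 = 1 from rfl]
    rw [show ws.take 1 = [ws[0]] from by
      rw [List.take_succ_eq_append_getElem (by omega)]; simp]
    rw [pv_intercalate_singleton]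
    by_cases hSe : ws.drop (b+2) = []
    · rw [hSe, pv_intercalate_singleton, pv_intercalate_singleton]
      simp
    · rw [pv_intercalate_cons ' ' _ _ hSe, pv_intercalate_cons ' ' _ _ hSe]
      simp
  · have hPne : ws.take a ≠ [] := by
      rcases ws with _ | ⟨w0, t⟩
      · simp at han
      · rcases a with _ | a'
        · omega
        · simp
    rw [show a + 1 = a + 1 from rfl, List.take_succ_eq_append_getElem han]
    rw [pv_intercalate_append ' ' _ _ hPne (by simp)]
    rw [pv_intercalate_singleton]
    rw [pv_intercalate_append ' ' _ _ hPne (by simp)]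
    by_cases hSe : ws.drop (b+2) = []
    · rw [hSe, pv_intercalate_singleton, pv_intercalate_singleton]
      simp
    · rw [pv_intercalate_cons ' ' _ _ hSe, pv_intercalate_cons ' ' _ _ hSe]
      simp

theorem pv_intercalate_nil_left (ps : List (List Char)) :
    ([] : List Char).intercalate ps = ps.flatten := by
  induction ps with
  | nil => simp [List.intercalate]
  | cons p ps ih =>
    rcases ps with _ | ⟨q, qs⟩
    · simp [List.intercalate]
    · simp only [List.intercalate, List.intersperse, List.flatten_cons] at ih ⊢
      simp [ih]

theorem pv_words_eq (variant : String) :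
    (PySem.Str.split? variant " ").getD []
      = (List.splitOn ' ' variant.toList).map String.ofList := by
  rw [PySem.Str.split?]
  rw [show (" " : String).toList = [' '] from rfl]
  rw [PySem.Chars.split?, if_neg (by simp)]
  simp [pv_splitOn_eq]

-- the canonical merged variant: words a..b+1 of ws fused (b - a + 2 words from index a)
def pvCanon (ws : List (List Char)) (a b : Nat) : List Char :=
  [' '].intercalate (ws.take a ++ ((ws.drop a).take (b - a + 2)).flatten :: ws.drop (a + (b - a + 2)))

theorem pv_astr (ws : List (List Char)) (i L : Nat) :
    (PySem.Str.join " " (PySem.List.slice (ws.map String.ofList) none (some (i:Int)) ++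
      [PySem.Str.join "" (PySem.List.slice (ws.map String.ofList) (some (i:Int)) (some ((i:Int) + (L:Int))))] ++
      PySem.List.slice (ws.map String.ofList) (some ((i:Int)+(L:Int))) none)).toList
    = [' '].intercalate (ws.take i ++ ((ws.drop i).take L).flatten :: ws.drop (i+L)) := by
  rw [show ((i:Int) + (L:Int)) = (((i+L : Nat)) : Int) from by push_cast; ring]
  rw [PySem.Str.toList_join, PySem.Chars.join]
  rw [PySem.List.slice_to_natCast, PySem.List.slice_from_natCast]
  rw [show (some ((i:Int))) = some ((i:Int)) from rfl]
  rw [PySem.List.slice_natCast]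
  rw [show (i + L) - i = L from by omega]
  rw [show (" " : String).toList = [' '] from rfl]
  simp only [List.map_append, List.map_take, List.map_drop, List.map_map, List.map_cons,
    List.map_nil, PySem.Str.toList_join, PySem.Chars.join,
    show ("" : String).toList = ([] : List Char) from rfl, pv_intercalate_nil_left]
  rw [show List.map (String.toList ∘ String.ofList) ws = ws from by simp [Function.comp_def]]
  simp

theorem pv_bstr (variant : String) (a b : Nat) (hab : a ≤ b)
    (hb : b < (pvSpacePos (List.splitOn ' ' variant.toList)).length) :
    (PySem.Str.slice variant none (some ((pvSpacePos (List.splitOn ' ' variant.toList))[a]'(Nat.lt_of_le_of_lt hab hb) : Int)) ++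
     PySem.Str.replace (PySem.Str.slice variant
        (some ((pvSpacePos (List.splitOn ' ' variant.toList))[a]'(Nat.lt_of_le_of_lt hab hb) : Int))
        (some (((pvSpacePos (List.splitOn ' ' variant.toList))[b] : Int) + 1))) " " "" ++
     PySem.Str.slice variant (some (((pvSpacePos (List.splitOn ' ' variant.toList))[b] : Int) + 1)) none).toList
    = pvCanon (List.splitOn ' ' variant.toList) a b := by
  set ws := List.splitOn ' ' variant.toList with hws
  set sp := pvSpacePos ws with hsp
  have hic : [' '].intercalate ws = variant.toList := List.intercalate_splitOn variant.toList ' '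
  have hsf : ∀ w ∈ ws, ' ' ∉ w := pv_splitOn_no_space variant.toList
  have ha : a < sp.length := Nat.lt_of_le_of_lt hab hb
  simp only [String.toList_append, PySem.Str.toList_slice, PySem.Str.toList_replace,
    PySem.Chars.slice_eq_listSlice]
  rw [show (" " : String).toList = [' '] from rfl, show ("" : String).toList = ([] : List Char) from rfl]
  rw [show ((sp[b] : Int) + 1) = ((sp[b] + 1 : Nat) : Int) from by push_cast; ring]
  rw [PySem.List.slice_to_natCast, PySem.List.slice_from_natCast, PySem.List.slice_natCast]
  rw [pv_replace_space]
  have key := pv_pointwise ws hsf a b hab hb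
  rw [hic] at key
  simp only [pvCanon]
  exact key

theorem pv_double_foldl (r : List Int) (inner : Int → List Int) (f : Int → Int → String)
    (init : List String) :
    r.foldl (fun acc L => (inner L).foldl (fun acc i => acc ++ [f L i]) acc) init
      = init ++ r.flatMap (fun L => (inner L).map (f L)) := by
  rw [PySem.List.foldl_congr_mem r _ (fun acc L => acc ++ ((inner L).map (f L))) init
    (fun acc L _ => PySem.List.foldl_append_singleton_eq_map _ _ _)]
  exact PySem.List.foldl_append_eq_flatMap _ _ init

theorem pv_main (variant : String) :
    merge_adjacent_words variant = merge_adjacent_words_alt variant := by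
  have hwords := pv_words_eq variant
  simp only [merge_adjacent_words, merge_adjacent_words_alt, hwords]
  set ws := List.splitOn ' ' variant.toList with hwsdef
  simp only [PySem.List.len_eq, List.length_map]
  by_cases h2 : ((ws.length : Int) < 2)
  · rw [if_pos h2, if_pos h2]
  · rw [if_neg h2, if_neg h2]
    have hlen2 : 2 ≤ ws.length := by exact_mod_cast not_lt.mp h2
    have hsf : ∀ w ∈ ws, ' ' ∉ w := pv_splitOn_no_space variant.toList
    have hnn : ws ≠ [] := pv_splitOn_ne_nil variant.toList
    have hic : [' '].intercalate ws = variant.toList := List.intercalate_splitOn variant.toList ' '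
    set sp := pvSpacePos ws with hspdef
    have hsplen : sp.length = ws.length - 1 := pv_length_spacePos ws
    have hspaces : ((PySem.List.enumerate variant.toList).filter (fun p => p.2 == ' ')).map (·.1)
        = sp.map (fun k : Nat => (k : Int)) := by
      have h0 := pv_spaces_eq ws 0 hsf hnn
      rw [hic] at h0
      rw [h0]
      exact List.map_congr_left (fun k _ => by simp)
    rw [hspaces]
    have hflen : (List.filter (fun p => p.2 == ' ') (PySem.List.enumerate variant.toList)).length
        = sp.length := by
      have := congrArg List.length hspaces
      simpa using this
    rw [hflen]
    rw [pv_double_foldl, pv_double_foldl]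
    have hget : ∀ (k : Nat) (hk : k < sp.length),
        PySem.List.pyGetD (sp.map (fun k : Nat => (k:Int))) ((k : Nat) : Int) 0
          = ((sp[k]'hk : Nat) : Int) := by
      intro k hk
      rw [PySem.List.pyGetD_natCast, List.getD_eq_getElem _ _ (by simpa using hk),
        List.getElem_map]
    refine PySem.List.sorted_eq_sorted_of_perm _ _ _ (fun x y h => h)
      ((List.perm_ext_iff_of_nodup (PySem.Set.nodup_ofList _) (PySem.Set.nodup_ofList _)).mpr ?_)
    intro x
    rw [PySem.Set.mem_ofList, PySem.Set.mem_ofList]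
    simp only [List.nil_append, List.mem_append, List.mem_flatMap, List.mem_map,
      List.mem_cons, PySem.List.mem_pyRange_one]
    constructor
    · rintro (⟨L, ⟨hL2, hLn⟩, i, ⟨hi0, hin⟩, hx⟩ | hxv)
      · -- from A's (L, i) to B's (a, b) = (i, i + L - 2)
        refine Or.inr ?_
        set L' := L.toNat with hL'
        set i' := i.toNat with hi'
        have hLc : L = ((L' : Nat) : Int) := Int.eq_natCast_toNat.mpr (by omega)
        have hic2 : i = ((i' : Nat) : Int) := Int.eq_natCast_toNat.mpr hi0
        have hL2' : 2 ≤ L' := by omega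
        have hiL : i' + L' ≤ ws.length := by omega
        rw [hLc, hic2] at hx
        have hb' : i' + L' - 2 < sp.length := by omega
        have ha' : i' < sp.length := by omega
        refine ⟨((i' : Nat) : Int), ⟨by omega, by omega⟩, (((i' + L' - 2 : Nat)) : Int), ⟨by omega, by omega⟩, ?_⟩
        rw [hget i' ha', hget (i' + L' - 2) hb']
        apply String.toList_inj.mp
        rw [← hx, pv_astr]
        rw [pv_bstr variant i' (i' + L' - 2) (by omega) hb']
        rw [pvCanon, show i' + L' - 2 - i' + 2 = L' from by omega]
      · exact Or.inl hxv
    · rintro (hxv | ⟨a, ⟨ha0, ham⟩, b, ⟨hab, hbm⟩, hx⟩)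
      · exact Or.inr hxv
      · refine Or.inl ?_
        set a' := a.toNat with ha'
        set b' := b.toNat with hb'
        have hac : a = ((a' : Nat) : Int) := Int.eq_natCast_toNat.mpr ha0
        have hbc : b = ((b' : Nat) : Int) := Int.eq_natCast_toNat.mpr (by omega)
        have hab' : a' ≤ b' := by omega
        have hbm' : b' < sp.length := by omega
        have ham' : a' < sp.length := by omega
        rw [hac, hbc, hget a' ham', hget b' hbm'] at hx
        refine ⟨(((b' - a' + 2 : Nat)) : Int), ⟨by omega, by omega⟩, ((a' : Nat) : Int), ⟨by omega, by omega⟩, ?_⟩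
        apply String.toList_inj.mp
        rw [← hx, pv_astr]
        rw [pv_bstr variant a' b' hab' hbm']
        rw [pvCanon, show a' + (b' - a' + 2) = a' + (b' - a') + 2 from by omega,
          show a' + (b' - a') = b' from by omega]

-- ===== VERDICT (by name: the statement is the Claim_ definition above) =====
theorem merge_adjacent_words_spec : Claim_equal_merge_adjacent_words := by
  intro variant _
  unfold Spec_merge_adjacent_words
  exact pv_main variant
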